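-- pv_equiv track=rewrite | github.com/DhanushNehru/Python-Scripts | Matrix Operations/checker.py | check_matrix_dimension
-- ===== SOURCE A (Python) =====
-- def validate_matrix(m):
--     """
--     This function validates a matrix.
--
--     It checks if the 2d array is a valid matrix and if the matrix is a list of
--     lists.
--
--     Args:
--         m (list of lists): The matrix to be validated.
--
--     Returns:
--         bool: True if the matrix is valid, False otherwise.
--     """
--     n = len(m[0])
--     for i in range(len(m)):
--         if len(m[i]) != n:
--             return False
--     return True
--
-- def check_matrix_dimension(m1, m2):
--     """
--     This function checks if two matrices can be added.
--
--     It checks if the two matrices have the same dimensions.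
--
--     Args:
--         m1 (list of lists): The first matrix.
--         m2 (list of lists): The second matrix.
--
--     Returns:
--         bool: True if the two matrices can be added, False otherwise.
--     """
--     if (validate_matrix(m1) and validate_matrix(m2)) == False:
--         return False
--     n = len(m1)
--     if (n != len(m2)):
--         return False
--     for i in range(n):
--         if (len(m1[i]) != len(m2[i])):
--             return False
--     return True
-- ===== SOURCE B (Python) =====
-- def check_matrix_dimension(m1, m2):
--     """One simultaneous recursive walk over both matrices, carrying the
--     expected column count c = len(m1[0]); no separate validation passes."""
--     c = len(m1[0])
--     def walk(r1, r2):
--         if not r1 and not r2: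
--             return True
--         if not r1 or not r2:
--             return False
--         return len(r1[0]) == c == len(r2[0]) and walk(r1[1:], r2[1:])
--     return walk(m1, m2)
-- ===== Notes on version B (the rewrite author's own statement) =====
-- stated objective: alternative
-- what changed: B replaces A's staged passes (validate m1, validate m2, compare lengths, then a joint per-row loop) with a single simultaneous recursive walk over both row lists that carries the expected column count len(m1[0]) and checks both rows of each pair against it at once.
import Mathlib
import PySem

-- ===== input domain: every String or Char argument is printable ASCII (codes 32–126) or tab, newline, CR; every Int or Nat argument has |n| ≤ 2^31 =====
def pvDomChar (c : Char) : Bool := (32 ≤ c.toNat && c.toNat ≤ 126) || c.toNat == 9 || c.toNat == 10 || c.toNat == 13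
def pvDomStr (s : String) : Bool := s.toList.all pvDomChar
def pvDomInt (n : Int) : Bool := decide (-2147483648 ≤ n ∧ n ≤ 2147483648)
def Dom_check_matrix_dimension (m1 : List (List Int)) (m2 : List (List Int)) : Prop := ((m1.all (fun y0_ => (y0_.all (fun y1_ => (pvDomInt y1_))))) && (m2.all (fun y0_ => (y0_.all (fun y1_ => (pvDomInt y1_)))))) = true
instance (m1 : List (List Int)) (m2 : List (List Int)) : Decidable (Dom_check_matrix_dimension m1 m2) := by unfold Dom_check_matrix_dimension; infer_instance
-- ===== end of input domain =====

-- ===== PORT A =====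
-- B replaces A's staged passes by one simultaneous recursive walk over both row lists
-- carrying the expected width; no speed claim. Return-value equivalence only (no mutation).
def validate_matrix (m : List (List Int)) : Bool :=
  -- n = len(m[0]) (inlined; within Pre_ the matrix is nonempty so headD is m[0])
  (List.range m.length).all (fun i => (m.getD i []).length == (m.headD []).length)

def check_matrix_dimension (m1 : List (List Int)) (m2 : List (List Int)) : Bool :=
  if (validate_matrix m1 && validate_matrix m2) == false then false
  else
    let n := m1.length
    if n != m2.length then false
    else (List.range n).all (fun i => (m1.getD i []).length == (m2.getD i []).length)

-- ===== PORT B =====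
def walkRows (r1 r2 : List (List Int)) (c : Nat) : Bool :=
  match r1, r2 with
  | [], [] => true
  | x :: t1, y :: t2 => (x.length == c && c == y.length) && walkRows t1 t2 c
  | _, _ => false

def check_matrix_dimension_alt (m1 : List (List Int)) (m2 : List (List Int)) : Bool :=
  walkRows m1 m2 (m1.headD []).length

-- ===== PRECONDITION & SPEC =====
-- Pre_ excludes exactly the inputs where Python A raises IndexError (m[0] on an
-- empty list): m1 = [], or m1 rectangular (so the `and` does not short-circuit)
-- and m2 = [].
def Pre_check_matrix_dimension (m1 : List (List Int)) (m2 : List (List Int)) : Prop :=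
  m1 ≠ [] ∧ ((∀ row ∈ m1, row.length = (m1.headD []).length) → m2 ≠ [])
instance (m1 : List (List Int)) (m2 : List (List Int)) : Decidable (Pre_check_matrix_dimension m1 m2) := by unfold Pre_check_matrix_dimension; infer_instance
def pvWitness_check_matrix_dimension : List (List Int) × List (List Int) := ([[1, 2], [3, 4]], [[5, 6], [7, 8]])

def Spec_check_matrix_dimension (m1 : List (List Int)) (m2 : List (List Int)) (out : Bool) : Prop := out = check_matrix_dimension_alt m1 m2
instance (m1 : List (List Int)) (m2 : List (List Int)) (out : Bool) : Decidable (Spec_check_matrix_dimension m1 m2 out) := by unfold Spec_check_matrix_dimension; infer_instance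

-- ===== CLAIM =====
def Claim_equal_check_matrix_dimension : Prop := ∀ (m1 : List (List Int)) (m2 : List (List Int)), Dom_check_matrix_dimension m1 m2 → Pre_check_matrix_dimension m1 m2 → Spec_check_matrix_dimension m1 m2 (check_matrix_dimension m1 m2)

-- ===== LEMMAS AND PROOFS =====

theorem valid_iff (m : List (List Int)) :
    validate_matrix m = true ↔ ∀ i < m.length, (m.getD i []).length = (m.headD []).length := by
  simp [validate_matrix]

theorem valid_iff_mem (m : List (List Int)) :
    validate_matrix m = true ↔ ∀ row ∈ m, row.length = (m.headD []).length := by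
  rw [valid_iff]
  constructor
  · intro h row hrow
    obtain ⟨i, hi, rfl⟩ := List.mem_iff_getElem.mp hrow
    have := h i hi
    rwa [List.getD_eq_getElem _ _ hi] at this
  · intro h i hi
    rw [List.getD_eq_getElem _ _ hi]
    exact h _ (List.getElem_mem hi)

theorem walkRows_char (r1 r2 : List (List Int)) (c : Nat) :
    walkRows r1 r2 c = true ↔
      r1.length = r2.length ∧ (∀ x ∈ r1, x.length = c) ∧ (∀ y ∈ r2, y.length = c) := by
  induction r1 generalizing r2 with
  | nil => cases r2 <;> simp [walkRows]
  | cons x t1 ih =>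
    cases r2 with
    | nil => simp [walkRows]
    | cons y t2 =>
      simp only [walkRows, Bool.and_eq_true, beq_iff_eq, ih, List.length_cons,
        List.mem_cons]
      constructor
      · rintro ⟨⟨hx, hy⟩, hlen, h1, h2⟩
        exact ⟨by omega, by rintro z (rfl | hz); exact hx; exact h1 z hz,
               by rintro z (rfl | hz); exact hy.symm; exact h2 z hz⟩
      · rintro ⟨hlen, h1, h2⟩
        exact ⟨⟨h1 x (Or.inl rfl), (h2 y (Or.inl rfl)).symm⟩, by omega,
               fun z hz => h1 z (Or.inr hz), fun z hz => h2 z (Or.inr hz)⟩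

theorem check_matrix_dimension_spec : Claim_equal_check_matrix_dimension := by
  intro m1 m2 _ hpre
  obtain ⟨hne1, hrect⟩ := hpre
  unfold Spec_check_matrix_dimension
  apply Bool.coe_iff_coe.mp
  rw [check_matrix_dimension_alt, walkRows_char]
  set c := (m1.headD []).length with hc
  unfold check_matrix_dimension
  cases h1 : validate_matrix m1 with
  | false =>
    simp only [Bool.false_and, beq_self_eq_true, if_true, Bool.false_eq_true, false_iff]
    rintro ⟨-, hall1, -⟩
    exact absurd ((valid_iff_mem m1).mpr hall1) (by simp [h1])
  | true =>
    have hall1 : ∀ row ∈ m1, row.length = c := (valid_iff_mem m1).mp h1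
    have hne2 : m2 ≠ [] := hrect hall1
    cases h2 : validate_matrix m2 with
    | false =>
      simp only [Bool.true_and, beq_self_eq_true, if_true, Bool.false_eq_true, false_iff]
      rintro ⟨-, -, hall2⟩
      apply absurd _ (by simp [h2] : ¬ validate_matrix m2 = true)
      rw [valid_iff_mem]
      cases m2 with
      | nil => exact absurd rfl hne2
      | cons r t =>
        intro row hrow
        simp only [List.headD_cons]
        rw [hall2 row hrow, hall2 r (List.mem_cons_self ..)]
    | true =>
      have hall2 : ∀ row ∈ m2, row.length = (m2.headD []).length := (valid_iff_mem m2).mp h2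
      simp only [Bool.and_self, if_neg (by decide : ¬ (((true : Bool) == false) = true))]
      by_cases hlen : m1.length = m2.length
      · rw [if_neg (by simp [hlen])]
        simp only [List.all_eq_true, List.mem_range, beq_iff_eq]
        constructor
        · intro h
          refine ⟨hlen, hall1, ?_⟩
          intro y hy
          obtain ⟨j, hj, rfl⟩ := List.mem_iff_getElem.mp hy
          have hj1 : j < m1.length := by omega
          have := h j hj1
          rw [List.getD_eq_getElem _ _ hj1, List.getD_eq_getElem _ _ hj] at this
          rw [← this]
          exact hall1 _ (List.getElem_mem hj1)
        · rintro ⟨-, -, h2all⟩ i hi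
          have hi2 : i < m2.length := by omega
          rw [List.getD_eq_getElem _ _ hi, List.getD_eq_getElem _ _ hi2,
            hall1 _ (List.getElem_mem hi), h2all _ (List.getElem_mem hi2)]
      · rw [if_pos (by simp [hlen])]
        simp only [Bool.false_eq_true, false_iff, not_and]
        intro h
        exact absurd h hlen

-- ===== VERDICT =====
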